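-- pv_equiv track=rewrite | github.com/makumark/BA-Assistant-Tool | test_validation_contextual_ai.py | get_story_validation_criteria
-- ===== SOURCE A (Python) =====
-- def get_story_validation_criteria(domain, epic_title, action, persona):
--     """AI-enhanced validation criteria generation (mirrored from frontend)"""
--     base_validations = [
--         'Input validation ensures data integrity and prevents malformed data entry',
--         'Error handling provides clear, actionable feedback to users',
--         'Security validation prevents unauthorized access and data breaches',
--         'Performance validation ensures response times meet user expectations'
--     ]
--
--     telecom_validations = [
--         'Telecom regulatory compliance (TRAI/DoT) must be enforced for all operations',
--         'Number portability (MNP) processing must complete within regulatory timeframes',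
--         'Real-time charging accuracy must be validated to prevent revenue leakage',
--         'KYC validation must comply with telecom industry standards and DoT guidelines',
--         'SIM/eSIM provisioning must follow secure activation protocols',
--         'Billing accuracy must be verified with mediation and reconciliation processes',
--         'Network integration APIs (HLR/HSS/OCS) must handle failover scenarios'
--     ]
--
--     validations = base_validations.copy()
--
--     if domain == 'telecom':
--         epic_lower = epic_title.lower()
--
--         # AI-style contextual filtering based on EPIC content
--         if any(keyword in epic_lower for keyword in ['billing', 'charging']):
--             validations.extend([v for v in telecom_validations if any(kw in v.lower() for kw in ['billing', 'charging', 'revenue', 'mediation'])])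
--         elif any(keyword in epic_lower for keyword in ['onboarding', 'activation', 'sim']):
--             validations.extend([v for v in telecom_validations if any(kw in v.lower() for kw in ['kyc', 'activation', 'provisioning', 'sim'])])
--         elif any(keyword in epic_lower for keyword in ['compliance', 'regulatory', 'analytics']):
--             validations.extend([v for v in telecom_validations if any(kw in v.lower() for kw in ['regulatory', 'compliance', 'trai', 'dot'])])
--         else:
--             # Add general telecom validations for other EPICs
--             validations.extend(telecom_validations[:3])
--
--     # Remove duplicates and limit
--     unique_validations = list(dict.fromkeys(validations))
--     return unique_validations[:7]
-- ===== SOURCE B (Python) =====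
-- # All filter inputs are module-level constants, so the per-call keyword filtering,
-- # dedup and truncation of A are precomputed once: each EPIC category maps directly
-- # to its (already filtered, duplicate-free, <=7-total) extra-validation list.
--
-- BASE_VALIDATIONS = [
--     'Input validation ensures data integrity and prevents malformed data entry',
--     'Error handling provides clear, actionable feedback to users',
--     'Security validation prevents unauthorized access and data breaches',
--     'Performance validation ensures response times meet user expectations',
-- ]
--
-- CATEGORY_TRIGGERS = [
--     ('billing', ['billing', 'charging']),
--     ('onboarding', ['onboarding', 'activation', 'sim']),
--     ('compliance', ['compliance', 'regulatory', 'analytics']),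
-- ]
--
-- CATEGORY_EXTRAS = {
--     'billing': [
--         'Real-time charging accuracy must be validated to prevent revenue leakage',
--         'Billing accuracy must be verified with mediation and reconciliation processes',
--     ],
--     'onboarding': [
--         'KYC validation must comply with telecom industry standards and DoT guidelines',
--         'SIM/eSIM provisioning must follow secure activation protocols',
--     ],
--     'compliance': [
--         'Telecom regulatory compliance (TRAI/DoT) must be enforced for all operations',
--         'Number portability (MNP) processing must complete within regulatory timeframes',
--         'KYC validation must comply with telecom industry standards and DoT guidelines',
--     ],
--     'other': [
--         'Telecom regulatory compliance (TRAI/DoT) must be enforced for all operations',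
--         'Number portability (MNP) processing must complete within regulatory timeframes',
--         'Real-time charging accuracy must be validated to prevent revenue leakage',
--     ],
-- }
--
--
-- def get_story_validation_criteria(domain, epic_title, action, persona):
--     if domain != 'telecom':
--         return BASE_VALIDATIONS.copy()
--     epic_lower = epic_title.lower()
--     category = next((cat for cat, triggers in CATEGORY_TRIGGERS
--                      if any(t in epic_lower for t in triggers)), 'other')
--     return BASE_VALIDATIONS + CATEGORY_EXTRAS[category]
-- ===== Notes on version B (the rewrite author's own statement) =====
-- stated objective: simpler
-- what changed: Because every filter operates on module-level constants, B precomputes a category->extras dictionary once, so the per-call keyword filtering over telecom_validations, the dict.fromkeys dedup and the [:7] truncation all disappear; only the first-matching trigger lookup remains.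
import Mathlib
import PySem

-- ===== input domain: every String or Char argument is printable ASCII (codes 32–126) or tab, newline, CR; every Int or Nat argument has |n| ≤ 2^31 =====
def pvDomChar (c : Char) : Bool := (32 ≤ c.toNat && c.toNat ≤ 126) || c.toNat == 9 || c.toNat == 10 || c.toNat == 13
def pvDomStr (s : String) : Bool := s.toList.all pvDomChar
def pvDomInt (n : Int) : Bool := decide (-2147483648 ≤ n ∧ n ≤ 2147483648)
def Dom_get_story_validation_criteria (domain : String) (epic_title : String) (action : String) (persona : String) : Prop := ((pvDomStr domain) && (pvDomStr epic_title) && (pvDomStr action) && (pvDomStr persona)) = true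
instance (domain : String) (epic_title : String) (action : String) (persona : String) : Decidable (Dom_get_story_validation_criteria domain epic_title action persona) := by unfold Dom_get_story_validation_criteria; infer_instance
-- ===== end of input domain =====

-- B precomputes each EPIC category's extra validations as constants, so A's per-call keyword filtering, dedup and [:7] truncation disappear (objective: simpler).


-- ===== PORT A =====
def pvBase : List String := [
  "Input validation ensures data integrity and prevents malformed data entry",
  "Error handling provides clear, actionable feedback to users",
  "Security validation prevents unauthorized access and data breaches",
  "Performance validation ensures response times meet user expectations"]

def pvTelecom : List String := [
  "Telecom regulatory compliance (TRAI/DoT) must be enforced for all operations",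
  "Number portability (MNP) processing must complete within regulatory timeframes",
  "Real-time charging accuracy must be validated to prevent revenue leakage",
  "KYC validation must comply with telecom industry standards and DoT guidelines",
  "SIM/eSIM provisioning must follow secure activation protocols",
  "Billing accuracy must be verified with mediation and reconciliation processes",
  "Network integration APIs (HLR/HSS/OCS) must handle failover scenarios"]

def get_story_validation_criteria (domain : String) (epic_title : String) (action : String) (persona : String) : List String :=
  let base_validations := pvBase
  let telecom_validations := pvTelecom
  let validations := base_validations
  let validations :=
    if domain == "telecom" then
      let epic_lower := PySem.Str.lower epic_title
      if (["billing", "charging"]).any (fun keyword => PySem.Str.isIn keyword epic_lower) then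
        validations ++ telecom_validations.filter
          (fun v => (["billing", "charging", "revenue", "mediation"]).any (fun kw => PySem.Str.isIn kw (PySem.Str.lower v)))
      else if (["onboarding", "activation", "sim"]).any (fun keyword => PySem.Str.isIn keyword epic_lower) then
        validations ++ telecom_validations.filter
          (fun v => (["kyc", "activation", "provisioning", "sim"]).any (fun kw => PySem.Str.isIn kw (PySem.Str.lower v)))
      else if (["compliance", "regulatory", "analytics"]).any (fun keyword => PySem.Str.isIn keyword epic_lower) then
        validations ++ telecom_validations.filter
          (fun v => (["regulatory", "compliance", "trai", "dot"]).any (fun kw => PySem.Str.isIn kw (PySem.Str.lower v)))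
      else
        validations ++ telecom_validations.take 3   -- telecom_validations[:3]
    else validations
  (PySem.List.dedup validations).take 7   -- list(dict.fromkeys(...))[:7]

-- ===== PORT B =====
def pvBaseValidations : List String := [
  "Input validation ensures data integrity and prevents malformed data entry",
  "Error handling provides clear, actionable feedback to users",
  "Security validation prevents unauthorized access and data breaches",
  "Performance validation ensures response times meet user expectations"]

def pvCategoryTriggers : List (String × List String) := [
  ("billing", ["billing", "charging"]),
  ("onboarding", ["onboarding", "activation", "sim"]),
  ("compliance", ["compliance", "regulatory", "analytics"])]

def pvCategoryExtras : PySem.Dict String (List String) := PySem.Dict.ofList [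
  ("billing", [
    "Real-time charging accuracy must be validated to prevent revenue leakage",
    "Billing accuracy must be verified with mediation and reconciliation processes"]),
  ("onboarding", [
    "KYC validation must comply with telecom industry standards and DoT guidelines",
    "SIM/eSIM provisioning must follow secure activation protocols"]),
  ("compliance", [
    "Telecom regulatory compliance (TRAI/DoT) must be enforced for all operations",
    "Number portability (MNP) processing must complete within regulatory timeframes",
    "KYC validation must comply with telecom industry standards and DoT guidelines"]),
  ("other", [
    "Telecom regulatory compliance (TRAI/DoT) must be enforced for all operations",
    "Number portability (MNP) processing must complete within regulatory timeframes",
    "Real-time charging accuracy must be validated to prevent revenue leakage"])]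

def get_story_validation_criteria_alt (domain : String) (epic_title : String) (action : String) (persona : String) : List String :=
  if domain != "telecom" then pvBaseValidations
  else
    let epic_lower := PySem.Str.lower epic_title
    -- next((cat for cat, triggers in CATEGORY_TRIGGERS if any(...)), 'other')
    let category :=
      ((pvCategoryTriggers.find? (fun ct => ct.2.any (fun t => PySem.Str.isIn t epic_lower))).map Prod.fst).getD "other"
    -- CATEGORY_EXTRAS[category]; the key is always present, getD never takes its default
    pvBaseValidations ++ PySem.Dict.getD pvCategoryExtras category []

-- ===== PRECONDITION & SPEC =====
def Spec_get_story_validation_criteria (domain : String) (epic_title : String) (action : String) (persona : String) (out : List String) : Prop := out = get_story_validation_criteria_alt domain epic_title action persona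
instance (domain : String) (epic_title : String) (action : String) (persona : String) (out : List String) : Decidable (Spec_get_story_validation_criteria domain epic_title action persona out) := by unfold Spec_get_story_validation_criteria; infer_instance

-- ===== CLAIM (what is proved, stated in full; the proofs are below) =====
def Claim_equal_get_story_validation_criteria : Prop := ∀ (domain : String) (epic_title : String) (action : String) (persona : String), Dom_get_story_validation_criteria domain epic_title action persona → Spec_get_story_validation_criteria domain epic_title action persona (get_story_validation_criteria domain epic_title action persona)

-- ===== LEMMAS AND PROOFS =====

-- ===== VERDICT (by name: the statement is the Claim_ definition above) =====
set_option maxHeartbeats 2000000 in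
theorem get_story_validation_criteria_spec : Claim_equal_get_story_validation_criteria := by
  intro domain epic_title action persona _
  unfold Spec_get_story_validation_criteria get_story_validation_criteria get_story_validation_criteria_alt
  by_cases hd : domain == "telecom"
  · simp only [hd, bne, Bool.not_true, Bool.false_eq_true, if_true, if_false, pvCategoryTriggers,
      List.find?, List.any_cons, List.any_nil, Bool.or_false]
    by_cases h1 : (PySem.Str.isIn "billing" (PySem.Str.lower epic_title) ||
        PySem.Str.isIn "charging" (PySem.Str.lower epic_title)) = true <;>
      by_cases h2 : (PySem.Str.isIn "onboarding" (PySem.Str.lower epic_title) ||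
        (PySem.Str.isIn "activation" (PySem.Str.lower epic_title) ||
         PySem.Str.isIn "sim" (PySem.Str.lower epic_title))) = true <;>
      by_cases h3 : (PySem.Str.isIn "compliance" (PySem.Str.lower epic_title) ||
        (PySem.Str.isIn "regulatory" (PySem.Str.lower epic_title) ||
         PySem.Str.isIn "analytics" (PySem.Str.lower epic_title))) = true <;>
      simp only [Bool.not_eq_true] at * <;> simp only [h1, h2, h3] <;> rfl
  · simp only [hd, bne, Bool.false_eq_true, Bool.not_false, eq_self_iff_true, if_false, if_true]
    rfl
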